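-- pv_equiv track=rewrite | github.com/marcus-nealSFDC/yahoo_fantasy_agent_full | streamlit_app.py | _holes_by_position
-- ===== SOURCE A (Python) =====
-- def _holes_by_position(roster_list):
--     need = {"QB":0,"RB":0,"WR":0,"TE":0,"DEF":0}
--     for p in roster_list or []:
--         for pos in (p.get("eligible_positions") or []):
--             pos = pos.upper()
--             if pos in need:
--                 need[pos] += 1
--     holes = [k for k,v in need.items() if v <= 1]
--     return holes
-- ===== SOURCE B (Python) =====
-- def _holes_by_position(roster_list):
--     roster = roster_list or []
--     holes = []
--     for pos in ("QB", "RB", "WR", "TE", "DEF"):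
--         count = sum(1 for p in roster
--                       for e in (p.get("eligible_positions") or [])
--                       if e.upper() == pos)
--         if count <= 1:
--             holes.append(pos)
--     return holes
-- ===== Notes on version B (the rewrite author's own statement) =====
-- stated objective: alternative
-- what changed: Inverts the nesting: instead of one tallying pass that maintains a counter dict over the roster, B scans the roster once per fixed position and counts matches directly, appending positions with count <= 1 in order; no dict is built.
import Mathlib
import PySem

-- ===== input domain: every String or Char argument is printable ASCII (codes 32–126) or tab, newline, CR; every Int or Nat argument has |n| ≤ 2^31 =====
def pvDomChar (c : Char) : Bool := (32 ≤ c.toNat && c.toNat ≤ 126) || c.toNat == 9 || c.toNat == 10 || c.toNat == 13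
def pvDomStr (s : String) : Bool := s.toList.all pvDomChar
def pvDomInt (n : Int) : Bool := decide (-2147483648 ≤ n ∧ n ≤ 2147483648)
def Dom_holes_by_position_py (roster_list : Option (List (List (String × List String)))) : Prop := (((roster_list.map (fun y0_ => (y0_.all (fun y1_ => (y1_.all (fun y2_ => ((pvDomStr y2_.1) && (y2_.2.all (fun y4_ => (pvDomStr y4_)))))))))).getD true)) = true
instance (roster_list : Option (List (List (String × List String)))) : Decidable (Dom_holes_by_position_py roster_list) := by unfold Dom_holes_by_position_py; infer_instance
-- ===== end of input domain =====

-- B inverts A's nesting: one direct counting scan of the roster per fixed position instead of one tallying pass over a counter dict; same output, no speed claim.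

-- ===== PORT A =====
-- literal port of A ('pos = pos.upper()' is inlined at its two uses; 'x or []' on a list-or-None value is .getD [])
def holes_by_position_py (roster_list : Option (List (List (String × List String)))) : List String :=
  let need : PySem.Dict String Int :=
    PySem.Dict.ofList [("QB", 0), ("RB", 0), ("WR", 0), ("TE", 0), ("DEF", 0)]
  let need := (roster_list.getD []).foldl (fun need p =>
    (((PySem.Dict.mk p).get? "eligible_positions").getD []).foldl (fun need pos =>
      if need.contains (PySem.Str.upper pos) then
        need.modify (PySem.Str.upper pos) 0 (· + 1)
      else need) need) need
  (need.items.filter (fun kv => kv.2 ≤ 1)).map Prod.fst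

-- ===== PORT B =====
def holes_by_position_py_alt (roster_list : Option (List (List (String × List String)))) : List String :=
  let roster := roster_list.getD []
  (["QB", "RB", "WR", "TE", "DEF"]).foldl (fun holes pos =>
    let count : Int := roster.foldl (fun n p =>
      n + ((((PySem.Dict.mk p).get? "eligible_positions").getD []).countP
            (fun e => PySem.Str.upper e == pos) : Int)) 0
    if count ≤ 1 then holes ++ [pos] else holes) []

-- ===== PRECONDITION & SPEC =====
def Spec_holes_by_position_py (roster_list : Option (List (List (String × List String)))) (out : List String) : Prop := out = holes_by_position_py_alt roster_list
instance (roster_list : Option (List (List (String × List String)))) (out : List String) : Decidable (Spec_holes_by_position_py roster_list out) := by unfold Spec_holes_by_position_py; infer_instance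

-- ===== CLAIM (what is proved, stated in full; the proofs are below) =====
def Claim_equal_holes_by_position_py : Prop := ∀ (roster_list : Option (List (List (String × List String)))), Dom_holes_by_position_py roster_list → Spec_holes_by_position_py roster_list (holes_by_position_py roster_list)

-- ===== LEMMAS AND PROOFS =====

-- the five-entry counter dict A maintains
def pvD5 (a b c d e : Int) : PySem.Dict String Int :=
  PySem.Dict.mk [("QB", a), ("RB", b), ("WR", c), ("TE", d), ("DEF", e)]

-- number of eligible-position tokens of player p whose uppercase form is k
def pvCnt (k : String) (p : List (String × List String)) : Nat :=
  ((((PySem.Dict.mk p).get? "eligible_positions").getD []).countP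
    (fun e => PySem.Str.upper e == k))

lemma pv_add_count (a : Int) (cond : Bool) (n : Nat) :
    a + (if cond then (1 : Int) else 0) + (n : Int) = a + ((n + if cond then 1 else 0 : Nat) : Int) := by
  cases cond <;> simp
  all_goals omega

lemma pv_step (a b c d e : Int) (u : String) :
    (if (pvD5 a b c d e).contains u then (pvD5 a b c d e).modify u 0 (· + 1) else pvD5 a b c d e)
    = pvD5 (a + if u == "QB" then 1 else 0) (b + if u == "RB" then 1 else 0)
           (c + if u == "WR" then 1 else 0) (d + if u == "TE" then 1 else 0)
           (e + if u == "DEF" then 1 else 0) := by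
  by_cases h1 : u = "QB"
  · subst h1
    have hc : (pvD5 a b c d e).contains "QB" = true := rfl
    have hm : (pvD5 a b c d e).modify "QB" 0 (· + 1) = pvD5 (a+1) b c d e := rfl
    simp [hc, hm]
  by_cases h2 : u = "RB"
  · subst h2
    have hc : (pvD5 a b c d e).contains "RB" = true := rfl
    have hm : (pvD5 a b c d e).modify "RB" 0 (· + 1) = pvD5 a (b+1) c d e := rfl
    simp [hc, hm]
  by_cases h3 : u = "WR"
  · subst h3
    have hc : (pvD5 a b c d e).contains "WR" = true := rfl
    have hm : (pvD5 a b c d e).modify "WR" 0 (· + 1) = pvD5 a b (c+1) d e := rfl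
    simp [hc, hm]
  by_cases h4 : u = "TE"
  · subst h4
    have hc : (pvD5 a b c d e).contains "TE" = true := rfl
    have hm : (pvD5 a b c d e).modify "TE" 0 (· + 1) = pvD5 a b c (d+1) e := rfl
    simp [hc, hm]
  by_cases h5 : u = "DEF"
  · subst h5
    have hc : (pvD5 a b c d e).contains "DEF" = true := rfl
    have hm : (pvD5 a b c d e).modify "DEF" 0 (· + 1) = pvD5 a b c d (e+1) := rfl
    simp [hc, hm]
  · have hc : (pvD5 a b c d e).contains u = false := by
      simp [pvD5, PySem.Dict.contains]
      exact ⟨Ne.symm h1, Ne.symm h2, Ne.symm h3, Ne.symm h4, Ne.symm h5⟩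
    simp [hc, h1, h2, h3, h4, h5]

lemma pv_inner_fold (l : List String) (a b c d e : Int) :
    l.foldl (fun need pos =>
      if need.contains (PySem.Str.upper pos) then
        need.modify (PySem.Str.upper pos) 0 (· + 1)
      else need) (pvD5 a b c d e)
    = pvD5 (a + l.countP (fun x => PySem.Str.upper x == "QB"))
           (b + l.countP (fun x => PySem.Str.upper x == "RB"))
           (c + l.countP (fun x => PySem.Str.upper x == "WR"))
           (d + l.countP (fun x => PySem.Str.upper x == "TE"))
           (e + l.countP (fun x => PySem.Str.upper x == "DEF")) := by
  induction l generalizing a b c d e with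
  | nil => simp
  | cons x t ih =>
    simp only [List.foldl_cons, List.countP_cons]
    rw [pv_step, ih]
    congr 1 <;> exact pv_add_count _ _ _

lemma pv_outer_fold (r : List (List (String × List String))) (a b c d e : Int) :
    r.foldl (fun need p =>
      (((PySem.Dict.mk p).get? "eligible_positions").getD []).foldl (fun need pos =>
        if need.contains (PySem.Str.upper pos) then
          need.modify (PySem.Str.upper pos) 0 (· + 1)
        else need) need) (pvD5 a b c d e)
    = pvD5 (a + (r.map (pvCnt "QB")).sum) (b + (r.map (pvCnt "RB")).sum)
           (c + (r.map (pvCnt "WR")).sum) (d + (r.map (pvCnt "TE")).sum)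
           (e + (r.map (pvCnt "DEF")).sum) := by
  induction r generalizing a b c d e with
  | nil => simp
  | cons p t ih =>
    simp only [List.foldl_cons, List.map_cons, List.sum_cons]
    rw [pv_inner_fold, ih]
    simp only [pvCnt]
    congr 1 <;> push_cast <;> ring

lemma pv_bcount (r : List (List (String × List String))) (k : String) :
    r.foldl (fun n p =>
      n + ((((PySem.Dict.mk p).get? "eligible_positions").getD []).countP
            (fun e => PySem.Str.upper e == k) : Int)) 0
    = ((r.map (pvCnt k)).sum : Int) := by
  rw [PySem.List.foldl_add, zero_add]
  induction r with
  | nil => simp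
  | cons p t ih =>
    simp only [List.map_cons, List.sum_cons, ih, pvCnt]
    push_cast
    ring

-- the two ports with their lets unfolded (defeq to holes_by_position_py / _alt)
lemma pv_main (roster_list : Option (List (List (String × List String)))) :
    ((((roster_list.getD []).foldl (fun need p =>
      (((PySem.Dict.mk p).get? "eligible_positions").getD []).foldl (fun need pos =>
        if need.contains (PySem.Str.upper pos) then
          need.modify (PySem.Str.upper pos) 0 (· + 1)
        else need) need) (pvD5 0 0 0 0 0)).items.filter
          (fun kv => kv.2 ≤ 1)).map Prod.fst
    = (["QB", "RB", "WR", "TE", "DEF"]).foldl (fun holes pos =>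
        if ((roster_list.getD []).foldl (fun n p =>
          n + ((((PySem.Dict.mk p).get? "eligible_positions").getD []).countP
                (fun e => PySem.Str.upper e == pos) : Int)) 0) ≤ 1
        then holes ++ [pos] else holes) []) := by
  rw [pv_outer_fold]
  simp only [List.foldl_cons, List.foldl_nil, pv_bcount, zero_add]
  simp only [pvD5, List.filter_cons, List.filter_nil, decide_eq_true_eq]
  split_ifs <;> rfl

-- ===== VERDICT (by name: the statement is the Claim_ definition above) =====
theorem holes_by_position_py_spec : Claim_equal_holes_by_position_py := by
  intro roster_list _
  exact pv_main roster_list
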